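-- pv_equiv track=rewrite | github.com/jarensaa/knowit-julekalender-2018 | 18/solve.py | getLoser
-- ===== SOURCE A (Python) =====
-- def getLoser(string):
--     returnTupple = []
--     for char in string:
--         if(string.count(char) == 1):
--             returnTupple.append(1)
--         else:
--             returnTupple.append(0)
--
--     return tuple(returnTupple)
-- ===== SOURCE B (Python) =====
-- def getLoser(string):
--     # One pass builds char -> list of indices; second pass scatters 1s for
--     # singleton characters by index instead of re-scanning the string per position.
--     result = [0] * len(string)
--     positions = {}
--     for i, ch in enumerate(string):
--         positions.setdefault(ch, []).append(i)
--     for idxs in positions.values():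
--         if len(idxs) == 1:
--             result[idxs[0]] = 1
--     return tuple(result)
-- ===== Notes on version B (the rewrite author's own statement) =====
-- stated objective: faster
-- what changed: Replaces the per-position string.count scan (quadratic) with one pass that groups indices by character in a dict, then a second pass over the distinct characters that scatters 1s into a preallocated result by index.
import Mathlib
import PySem

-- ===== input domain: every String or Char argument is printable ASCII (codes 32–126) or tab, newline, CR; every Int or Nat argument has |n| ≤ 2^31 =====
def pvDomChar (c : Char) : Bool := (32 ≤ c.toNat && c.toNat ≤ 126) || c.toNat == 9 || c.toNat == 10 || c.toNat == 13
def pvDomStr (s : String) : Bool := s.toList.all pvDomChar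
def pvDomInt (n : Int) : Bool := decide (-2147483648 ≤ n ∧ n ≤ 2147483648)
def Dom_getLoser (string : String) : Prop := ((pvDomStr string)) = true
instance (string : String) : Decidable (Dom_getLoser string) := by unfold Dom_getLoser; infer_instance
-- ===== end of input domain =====

-- B replaces A's per-position string.count scan by one grouping pass (char -> index list)
-- plus a scatter over the distinct characters; objective: faster (asymptotic).


-- ===== PORT A =====
-- 'for char in string: if string.count(char) == 1: append 1 else append 0'
def getLoser (string : String) : List Int :=
  string.toList.foldl
    (fun acc c =>
      if PySem.Str.count string (String.ofList [c]) == 1 then acc ++ [(1 : Int)]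
      else acc ++ [(0 : Int)])
    []

-- ===== PORT B =====
-- positions.setdefault(ch, []).append(i)  ≡  d.modify ch [] (· ++ [i])
def altBuild (l : List Char) : PySem.Dict Char (List Int) :=
  (PySem.List.enumerate l).foldl (fun d p => d.modify p.2 [] (· ++ [p.1])) PySem.Dict.empty

-- second pass: for idxs in positions.values(): if len(idxs) == 1: result[idxs[0]] = 1
-- (idxs[0] comes from enumerate, hence is a nonnegative index: .toNat is exact here)
def getLoser_alt (string : String) : List Int :=
  let l := string.toList
  let positions := altBuild l
  positions.values.foldl
    (fun r idxs => if idxs.length == 1 then r.set (idxs.headD 0).toNat 1 else r)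
    (List.replicate l.length (0 : Int))

-- ===== PRECONDITION & SPEC =====
def Spec_getLoser (string : String) (out : List Int) : Prop := out = getLoser_alt string
instance (string : String) (out : List Int) : Decidable (Spec_getLoser string out) := by unfold Spec_getLoser; infer_instance

-- ===== CLAIM (what is proved, stated in full; the proofs are below) =====
def Claim_equal_getLoser : Prop := ∀ (string : String), Dom_getLoser string → Spec_getLoser string (getLoser string)

-- ===== LEMMAS AND PROOFS =====

-- indices (as produced by enumerate) at which character c occurs in l
def posOf (c : Char) (l : List Char) : List Int :=
  ((PySem.List.enumerate l).filter (fun p => p.2 == c)).map (·.1)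

-- Python's s.count(c) for a single character is the character count
theorem count_go_singleton (c : Char) :
    ∀ (l : List Char) (fuel acc : Nat), l.length ≤ fuel →
      PySem.Chars.count.go [c] fuel l acc = acc + l.count c := by
  intro l
  induction l with
  | nil =>
    intro fuel acc _
    cases fuel <;> simp [PySem.Chars.count.go]
  | cons h t ih =>
    intro fuel acc hf
    simp only [List.length_cons] at hf
    cases fuel with
    | zero => omega
    | succ f =>
      rw [PySem.Chars.count.go]
      by_cases hc : c = h
      · rw [if_pos (by subst hc; simp [List.isPrefixOf])]
        simp only [List.length_cons, List.drop_succ_cons, List.length_nil, List.drop_zero]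
        rw [ih f (acc + 1) (by omega)]
        subst hc
        simp
        omega
      · rw [if_neg (by simp [List.isPrefixOf]; exact fun e => hc e)]
        rw [ih f acc (by omega)]
        have : (h == c) = false := by simp; exact fun e => hc e.symm
        simp [List.count_cons, this]

theorem str_count_singleton (s : String) (c : Char) :
    PySem.Str.count s (String.ofList [c]) = s.toList.count c := by
  rw [PySem.Str.count_eq s (String.ofList [c]), PySem.Chars.count]
  simp only [String.toList_ofList, List.isEmpty_cons]
  rw [count_go_singleton c s.toList s.toList.length 0 le_rfl]
  simp

theorem getLoser_eq_map (s : String) :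
    getLoser s = s.toList.map
      (fun c => if s.toList.count c = 1 then (1 : Int) else 0) := by
  unfold getLoser
  have h := PySem.List.foldl_congr_mem
    (f := fun (acc : List Int) c =>
      if (PySem.Str.count s (String.ofList [c]) == 1) = true then acc ++ [(1 : Int)] else acc ++ [0])
    (g := fun (acc : List Int) c => acc ++ [if s.toList.count c = 1 then (1 : Int) else 0])
    (l := s.toList) (init := ([] : List Int))
    (by
      intro acc c _
      simp only [str_count_singleton, beq_iff_eq]
      split_ifs <;> rfl)
  rw [h, PySem.List.foldl_append_singleton_eq_map]
  simp

theorem posOf_mem (c : Char) (l : List Char) (j : Int) :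
    j ∈ posOf c l ↔ ∃ (k : Nat) (h : k < l.length), j = (k : Int) ∧ l[k] = c := by
  unfold posOf
  simp only [List.mem_map, List.mem_filter, PySem.List.mem_enumerate_iff]
  constructor
  · rintro ⟨p, ⟨⟨k, hk, rfl⟩, hc⟩, rfl⟩
    simp only [beq_iff_eq] at hc
    exact ⟨k, hk, by simp, hc⟩
  · rintro ⟨k, hk, rfl, hc⟩
    exact ⟨((k : Int), l[k]), ⟨⟨k, hk, by simp⟩, by simp [hc]⟩, rfl⟩

theorem posOf_length (c : Char) (l : List Char) :
    (posOf c l).length = l.count c := by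
  unfold posOf
  rw [List.length_map, ← List.countP_eq_length_filter]
  have : ∀ (s : Int), (PySem.List.enumerate l s).countP (fun p => p.2 == c)
      = l.countP (· == c) := by
    intro s
    induction l generalizing s with
    | nil => simp [PySem.List.enumerate_nil]
    | cons h t ih => simp [PySem.List.enumerate_cons, List.countP_cons, ih]
  rw [this 0, List.count_eq_countP]

theorem altBuild_getD (l : List Char) (c : Char) :
    (altBuild l).getD c [] = posOf c l := by
  unfold altBuild
  have hswap : (PySem.List.enumerate l).foldl
        (fun d p => d.modify p.2 [] (· ++ [p.1])) PySem.Dict.empty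
      = ((PySem.List.enumerate l).map Prod.swap).foldl
        (fun d q => d.modify q.1 [] (· ++ [q.2])) PySem.Dict.empty := by
    rw [List.foldl_map]
    simp [Prod.fst_swap, Prod.snd_swap]
  rw [hswap, PySem.Dict.getD_foldl_modify_append]
  unfold posOf
  simp [List.filter_map, List.map_map, Function.comp_def, Prod.swap]

theorem altBuild_nodup_keys (l : List Char) : (altBuild l).keys.Nodup := by
  unfold altBuild
  exact PySem.Dict.nodup_keys_foldl_modify_key _ _ _ _ _ (by simp [PySem.Dict.empty])

theorem altBuild_keys (l : List Char) :
    (altBuild l).keys = PySem.Set.ofList l := by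
  unfold altBuild
  rw [PySem.Dict.keys_foldl_modify_key]
  simp [PySem.List.map_snd_enumerate, PySem.Set.update_nil_left, PySem.Dict.empty]

theorem altBuild_values (l : List Char) :
    (altBuild l).values = (PySem.Set.ofList l).map (fun c => posOf c l) := by
  rw [PySem.Dict.values_eq_map_keys (altBuild l) (altBuild_nodup_keys l) []]
  rw [altBuild_keys]
  exact List.map_congr_left (fun c _ => altBuild_getD l c)

theorem scatter_getElem? (vs : List (List Int)) (r : List Int) (j : Nat) (hj : j < r.length) :
    (vs.foldl (fun r idxs => if idxs.length == 1 then r.set (idxs.headD 0).toNat 1 else r) r)[j]? =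
      if ∃ idxs ∈ vs, idxs.length = 1 ∧ (idxs.headD 0).toNat = j then some 1 else r[j]? := by
  induction vs generalizing r with
  | nil => simp
  | cons is vs ih =>
    simp only [List.foldl_cons]
    rw [ih _ (by by_cases h : is.length == 1 <;> simp [h, hj])]
    by_cases hvs : ∃ idxs ∈ vs, idxs.length = 1 ∧ (idxs.headD 0).toNat = j
    · rw [if_pos hvs, if_pos (by rcases hvs with ⟨w, hw, h1, h2⟩; exact ⟨w, by simp [hw], h1, h2⟩)]
    · rw [if_neg hvs]
      by_cases h1 : is.length = 1
      · simp only [h1, beq_self_eq_true, if_true]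
        by_cases h2 : (is.headD 0).toNat = j
        · rw [if_pos ⟨is, by simp, h1, h2⟩, h2, List.getElem?_set_self (by omega)]
        · rw [List.getElem?_set_ne (by omega), if_neg (by
            rintro ⟨w, hw, hl, hh⟩
            rcases List.mem_cons.mp hw with rfl | hw'
            · exact h2 hh
            · exact hvs ⟨w, hw', hl, hh⟩)]
      · have hb : (is.length == 1) = false := by simpa using h1
        simp only [hb, Bool.false_eq_true, if_false]
        rw [if_neg (by
          rintro ⟨w, hw, hl, hh⟩
          rcases List.mem_cons.mp hw with rfl | hw'
          · exact h1 hl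
          · exact hvs ⟨w, hw', hl, hh⟩)]

theorem scatter_length (vs : List (List Int)) (r : List Int) :
    (vs.foldl (fun r idxs => if idxs.length == 1 then r.set (idxs.headD 0).toNat 1 else r) r).length = r.length := by
  induction vs generalizing r with
  | nil => rfl
  | cons is vs ih =>
    simp only [List.foldl_cons]
    rw [ih]
    by_cases h : is.length == 1 <;> simp [h]

theorem bridge (l : List Char) (j : Nat) (hj : j < l.length) :
    (∃ idxs ∈ (PySem.Set.ofList l).map (fun c => posOf c l),
        idxs.length = 1 ∧ (idxs.headD 0).toNat = j) ↔ List.count l[j] l = 1 := by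
  constructor
  · rintro ⟨is, his, hlen, hhead⟩
    rcases List.mem_map.mp his with ⟨c, _, rfl⟩
    rcases List.length_eq_one_iff.mp hlen with ⟨i, hi⟩
    have hiMem : i ∈ posOf c l := by simp [hi]
    rcases (posOf_mem c l i).mp hiMem with ⟨k, hk, hki, hkc⟩
    have hkj : k = j := by
      rw [hi] at hhead
      simp only [List.headD_cons] at hhead
      rw [hki] at hhead
      simpa using hhead
    subst hkj
    rw [hkc, ← posOf_length c l]
    exact hlen
  · intro hcnt
    have hl1 : (posOf l[j] l).length = 1 := by rw [posOf_length]; exact hcnt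
    rcases List.length_eq_one_iff.mp hl1 with ⟨i, hi⟩
    have hjmem : (j : Int) ∈ posOf l[j] l :=
      (posOf_mem l[j] l (j : Int)).mpr ⟨j, hj, rfl, rfl⟩
    rw [hi] at hjmem
    simp only [List.mem_singleton] at hjmem
    refine ⟨posOf l[j] l,
      List.mem_map.mpr ⟨l[j], (PySem.Set.mem_ofList l l[j]).mpr (List.getElem_mem hj), rfl⟩, hl1, ?_⟩
    rw [hi, ← hjmem]
    simp

-- ===== VERDICT (by name: the statement is the Claim_ definition above) =====
theorem getLoser_spec : Claim_equal_getLoser := by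
  intro s _
  unfold Spec_getLoser
  simp only [getLoser_alt]
  rw [getLoser_eq_map, altBuild_values]
  apply List.ext_getElem?
  intro j
  by_cases hj : j < s.toList.length
  · rw [scatter_getElem? _ _ j (by simpa using hj)]
    rw [List.getElem?_map, List.getElem?_eq_getElem hj]
    simp only [Option.map_some]
    by_cases hb : List.count s.toList[j] s.toList = 1
    · rw [if_pos ((bridge s.toList j hj).mpr hb), if_pos hb]
    · rw [if_neg (fun h => hb ((bridge s.toList j hj).mp h)), if_neg hb]
      rw [List.getElem?_eq_getElem (by simpa using hj)]
      simp
  · have hj' : s.toList.length ≤ j := not_lt.mp hj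
    rw [List.getElem?_eq_none (by simpa), List.getElem?_eq_none (by rw [scatter_length]; simpa)]
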